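-- pv_equiv track=rewrite | github.com/DmitryChitalov/-algorithms_2021 | Урок 2. Практическое задание/HomeWork_2_2.py | type_numbers
-- ===== SOURCE A (Python) =====
-- def type_numbers(number, count_even=0, count_odd=0):
--     n = len(str(number)) - 1
--     if n < 1:
--         if number % 10 % 2 == 0:
--             count_even += 1
--         else:
--             count_odd += 1
--         return count_even, count_odd
--     else:
--         if number // 10**n % 2 == 0:
--             count_even += 1
--         else:
--             count_odd += 1
--         return type_numbers(number % 10**n, count_even, count_odd)
-- ===== SOURCE B (Python) =====
-- def type_numbers(number, count_even=0, count_odd=0):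
--     # iterative: strip the leading digit in a while loop instead of recursing
--     while len(str(number)) > 1:
--         p = 10 ** (len(str(number)) - 1)
--         if number // p % 2 == 0:
--             count_even += 1
--         else:
--             count_odd += 1
--         number %= p
--     if number % 10 % 2 == 0:
--         count_even += 1
--     else:
--         count_odd += 1
--     return count_even, count_odd
-- ===== Notes on version B (the rewrite author's own statement) =====
-- stated objective: idiomatic
-- what changed: Replaces A's tail recursion threading accumulator parameters with a plain while loop that strips the leading digit in place and a final single-digit step after the loop, keeping the exact same arithmetic (same leading-zero collapse and floor-div/mod behaviour on negatives).
import Mathlib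
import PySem

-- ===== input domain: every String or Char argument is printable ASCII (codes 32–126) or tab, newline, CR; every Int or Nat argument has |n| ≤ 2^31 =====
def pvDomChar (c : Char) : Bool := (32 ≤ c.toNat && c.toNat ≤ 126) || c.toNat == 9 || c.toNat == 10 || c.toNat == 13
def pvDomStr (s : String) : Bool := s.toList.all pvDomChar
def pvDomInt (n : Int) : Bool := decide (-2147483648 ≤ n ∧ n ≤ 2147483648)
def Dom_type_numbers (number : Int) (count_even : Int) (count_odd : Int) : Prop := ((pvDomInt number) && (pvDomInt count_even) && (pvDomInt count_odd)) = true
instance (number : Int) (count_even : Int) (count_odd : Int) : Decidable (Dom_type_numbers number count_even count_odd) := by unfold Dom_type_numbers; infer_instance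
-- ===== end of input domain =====

-- B replaces A's tail recursion with a plain while loop that strips the leading digit,
-- keeping the exact same arithmetic (idiomatic iterative form; same cost).

-- termination lemma for port A: stripping the leading digit shortens str(number)
theorem pvStripDec (number : Int)
    (h : 1 ≤ ((PySem.Int.toChars number).length : Int) - 1) :
    (PySem.Int.toChars (PySem.Int.mod number (10 ^ (((PySem.Int.toChars number).length : Int) - 1).toNat))).length
      < (PySem.Int.toChars number).length := by
  set L := (PySem.Int.toChars number).length with hL
  have hL2 : 2 ≤ L := by omega
  have hEnat : (((L : Int) - 1)).toNat = L - 1 := by omega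
  rw [hEnat]
  have hpow : (0 : Int) < 10 ^ (L - 1) := by positivity
  have h0 : 0 ≤ PySem.Int.mod number (10 ^ (L - 1)) := PySem.Int.mod_nonneg number hpow
  have hlt : PySem.Int.mod number (10 ^ (L - 1)) < 10 ^ (L - 1) := PySem.Int.mod_lt number hpow
  set m := PySem.Int.mod number (10 ^ (L - 1)) with hm
  have hneg : ¬ m < 0 := by omega
  have hmn : m.toNat < 10 ^ (L - 1) := by
    have : (m.toNat : Int) = m := Int.toNat_of_nonneg h0
    have : (m.toNat : Int) < ((10 : Nat) ^ (L - 1) : Nat) := by push_cast; omega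
    exact_mod_cast this
  have hlen : (Nat.toDigits 10 m.toNat).length ≤ L - 1 :=
    Nat.toDigits_length 10 m.toNat (L - 1) (by omega) hmn
  simp only [PySem.Int.toChars, hneg, if_false]
  omega

-- ===== PORT A =====
def type_numbers (number : Int) (count_even : Int) (count_odd : Int) : Int × Int :=
  let n : Int := ((PySem.Int.toChars number).length : Int) - 1
  if _hn : n < 1 then
    if PySem.Int.mod (PySem.Int.mod number 10) 2 = 0 then
      (count_even + 1, count_odd)
    else
      (count_even, count_odd + 1)
  else
    if PySem.Int.mod (PySem.Int.floordiv number (10 ^ n.toNat)) 2 = 0 then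
      type_numbers (PySem.Int.mod number (10 ^ n.toNat)) (count_even + 1) count_odd
    else
      type_numbers (PySem.Int.mod number (10 ^ n.toNat)) count_even (count_odd + 1)
termination_by (PySem.Int.toChars number).length
decreasing_by
  · exact pvStripDec number (by omega)
  · exact pvStripDec number (by omega)

-- ===== PORT B =====
-- the while loop of Source B; fuel only makes it total (len(str(number)) is always enough, proved below)
def typeNumbersLoop (fuel : Nat) (number : Int) (count_even : Int) (count_odd : Int) :
    Int × Int × Int :=
  match fuel with
  | 0 => (number, count_even, count_odd)
  | fuel + 1 =>
    if 1 < (PySem.Int.toChars number).length then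
      let p : Int := 10 ^ ((PySem.Int.toChars number).length - 1)
      if PySem.Int.mod (PySem.Int.floordiv number p) 2 = 0 then
        typeNumbersLoop fuel (PySem.Int.mod number p) (count_even + 1) count_odd
      else
        typeNumbersLoop fuel (PySem.Int.mod number p) count_even (count_odd + 1)
    else
      (number, count_even, count_odd)

def type_numbers_alt (number : Int) (count_even : Int) (count_odd : Int) : Int × Int :=
  let s := typeNumbersLoop (PySem.Int.toChars number).length number count_even count_odd
  if PySem.Int.mod (PySem.Int.mod s.1 10) 2 = 0 then
    (s.2.1 + 1, s.2.2)
  else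
    (s.2.1, s.2.2 + 1)

-- ===== PRECONDITION & SPEC =====
def Spec_type_numbers (number : Int) (count_even : Int) (count_odd : Int) (out : Int × Int) : Prop := out = type_numbers_alt number count_even count_odd
instance (number : Int) (count_even : Int) (count_odd : Int) (out : Int × Int) : Decidable (Spec_type_numbers number count_even count_odd out) := by unfold Spec_type_numbers; infer_instance

-- ===== CLAIM (what is proved, stated in full; the proofs are below) =====
def Claim_equal_type_numbers : Prop := ∀ (number : Int) (count_even : Int) (count_odd : Int), Dom_type_numbers number count_even count_odd → Spec_type_numbers number count_even count_odd (type_numbers number count_even count_odd)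

-- ===== LEMMAS AND PROOFS =====

theorem pvTcPos (number : Int) : 0 < (PySem.Int.toChars number).length := by
  by_cases h : number < 0 <;>
    simp [PySem.Int.toChars, h, Nat.length_toDigits_pos]

-- A equals "run the loop, then do the final single-digit step", for any sufficient fuel
theorem pvLoopEq (fuel : Nat) :
    ∀ (number count_even count_odd : Int),
      (PySem.Int.toChars number).length ≤ fuel →
      type_numbers number count_even count_odd =
        (let s := typeNumbersLoop fuel number count_even count_odd
         if PySem.Int.mod (PySem.Int.mod s.1 10) 2 = 0 then
           (s.2.1 + 1, s.2.2)
         else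
           (s.2.1, s.2.2 + 1)) := by
  induction fuel with
  | zero =>
    intro number _ _ h
    exact absurd h (by have := pvTcPos number; omega)
  | succ fuel ih =>
    intro number count_even count_odd h
    rw [type_numbers, typeNumbersLoop]
    set L := (PySem.Int.toChars number).length with hL
    by_cases hgt : 1 < L
    · have hn : ¬ ((L : Int) - 1 < 1) := by omega
      have htn : (((L : Int) - 1)).toNat = L - 1 := by omega
      simp only [hn, hgt, htn, if_true]
      have hdec : (PySem.Int.toChars (PySem.Int.mod number (10 ^ (L - 1)))).length ≤ fuel := by
        have := pvStripDec number (by omega)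
        rw [htn] at this
        omega
      by_cases hpar : PySem.Int.mod (PySem.Int.floordiv number (10 ^ (L - 1))) 2 = 0
      · rw [if_pos hpar, if_pos hpar]
        exact ih _ _ _ hdec
      · rw [if_neg hpar, if_neg hpar]
        exact ih _ _ _ hdec
    · have hn : (L : Int) - 1 < 1 := by omega
      simp only [hn, hgt, if_false]
      rw [dif_pos trivial]

theorem type_numbers_eq_alt (number count_even count_odd : Int) :
    type_numbers number count_even count_odd = type_numbers_alt number count_even count_odd := by
  rw [type_numbers_alt]
  exact pvLoopEq (PySem.Int.toChars number).length number count_even count_odd le_rfl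

-- ===== VERDICT (by name: the statement is the Claim_ definition above) =====
theorem type_numbers_spec : Claim_equal_type_numbers := by
  intro number count_even count_odd _
  exact type_numbers_eq_alt number count_even count_odd
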